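-- pv_equiv track=rewrite | github.com/alexpagu08/ia-assignment1 | problems/nqueens.py | compute
-- ===== SOURCE A (Python) =====
-- def compute(state):
--     n = len(state)
--     # 1) aristas de conflicto
--     edges = []
--     for c1 in range(n):
--         r1 = state[c1]
--         for c2 in range(c1 + 1, n):
--             r2 = state[c2]
--             if r1 == r2 or abs(r1 - r2) == abs(c1 - c2):
--                 edges.append((c1, c2))
--
--     if not edges:
--         return 0
--
--     # 2) matching greedy (parejas disjuntas)
--     matched = set()
--     msize = 0
--     for u, v in edges:
--         if u not in matched and v not in matched:
--             matched.add(u); matched.add(v)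
--             msize += 1
--     return msize
-- ===== SOURCE B (Python) =====
-- def compute(state):
--     # Single pass over columns: match each still-free column with the first
--     # later free column it conflicts with; no edge list is materialized.
--     n = len(state)
--     matched = [False] * n
--     msize = 0
--     for c1 in range(n):
--         if matched[c1]:
--             continue
--         r1 = state[c1]
--         for c2 in range(c1 + 1, n):
--             if not matched[c2]:
--                 r2 = state[c2]
--                 if r1 == r2 or abs(r1 - r2) == abs(c1 - c2):
--                     matched[c1] = True
--                     matched[c2] = True
--                     msize += 1
--                     break
--     return msize
-- ===== Notes on version B (the rewrite author's own statement) =====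
-- stated objective: faster
-- what changed: Instead of materializing the full Theta(n^2) conflict-edge list and then running the greedy pass over it, B does one pass over columns, pairing each still-free column with its first later free conflicting column (break) and skipping already-matched columns, so no edge list is ever built.
import Mathlib
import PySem

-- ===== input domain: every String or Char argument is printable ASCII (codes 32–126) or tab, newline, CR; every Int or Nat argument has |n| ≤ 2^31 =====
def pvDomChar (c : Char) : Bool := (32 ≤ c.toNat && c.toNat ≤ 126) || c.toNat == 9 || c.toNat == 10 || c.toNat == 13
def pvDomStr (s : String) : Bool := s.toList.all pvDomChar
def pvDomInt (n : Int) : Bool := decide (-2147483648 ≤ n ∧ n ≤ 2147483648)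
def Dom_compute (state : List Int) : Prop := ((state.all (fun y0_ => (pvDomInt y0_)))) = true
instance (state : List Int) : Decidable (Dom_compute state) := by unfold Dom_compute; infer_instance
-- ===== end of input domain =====

-- B replaces A's materialized conflict-edge list + greedy pass by one pass over columns that
-- pairs each still-free column with its first later free conflicting column (break), skipping
-- matched columns; no edge list is built (measured faster in a timing run).

-- ===== PORT A =====
-- shared helpers: the conflict test (same expression in both Pythons) and the candidate range
-- pyGet?.getD 0 is exact here: every index used is 0 ≤ c < len(state)
def pvR1 (state : List Int) (c1 : Nat) : Int := (PySem.List.pyGet? state (c1 : Int)).getD 0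

def pvConf (state : List Int) (r1 : Int) (c1 c2 : Nat) : Bool :=
  let r2 := (PySem.List.pyGet? state (c2 : Int)).getD 0
  r1 == r2 || ((r1 - r2).natAbs == ((c1 : Int) - (c2 : Int)).natAbs)

def pvCands (n c1 : Nat) : List Nat := List.range' (c1 + 1) (n - (c1 + 1))

def pvStepA (p : PySem.Set Nat × Int) (e : Nat × Nat) : PySem.Set Nat × Int :=
  if e.1 ∉ p.1 ∧ e.2 ∉ p.1 then (PySem.Set.add (PySem.Set.add p.1 e.1) e.2, p.2 + 1) else p

def compute (state : List Int) : Int :=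
  let n := state.length
  let edges : List (Nat × Nat) :=
    (List.range n).foldl (fun acc c1 =>
      (pvCands n c1).foldl (fun acc2 c2 =>
        if pvConf state (pvR1 state c1) c1 c2 then acc2 ++ [(c1, c2)] else acc2) acc) []
  if edges.isEmpty then 0
  else (edges.foldl pvStepA (PySem.Set.empty, 0)).2

-- ===== PORT B =====
def pvStepB (state : List Int) (n : Nat) (p : List Bool × Int) (c1 : Nat) : List Bool × Int :=
  if p.1.getD c1 false then p
  else
    match (pvCands n c1).find? (fun c2 => !p.1.getD c2 false && pvConf state (pvR1 state c1) c1 c2) with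
    | some c2 => ((p.1.set c1 true).set c2 true, p.2 + 1)
    | none => p

def compute_alt (state : List Int) : Int :=
  let n := state.length
  ((List.range n).foldl (pvStepB state n) (List.replicate n false, 0)).2

-- ===== PRECONDITION & SPEC =====
def Spec_compute (state : List Int) (out : Int) : Prop := out = compute_alt state
instance (state : List Int) (out : Int) : Decidable (Spec_compute state out) := by unfold Spec_compute; infer_instance

-- ===== CLAIM (what is proved, stated in full; the proofs are below) =====
def Claim_equal_compute : Prop := ∀ (state : List Int), Dom_compute state → Spec_compute state (compute state)

-- ===== LEMMAS AND PROOFS =====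

def pvGroup (state : List Int) (n c1 : Nat) : List (Nat × Nat) :=
  ((pvCands n c1).filter (fun c2 => pvConf state (pvR1 state c1) c1 c2)).map (fun c2 => (c1, c2))

def pvRel (n : Nat) (mA : PySem.Set Nat) (mB : List Bool) : Prop :=
  mB.length = n ∧ ∀ c, c < n → ((c ∈ mA) ↔ mB.getD c false = true)

theorem pv_edgesA (state : List Int) (n : Nat) :
    (List.range n).foldl (fun acc c1 =>
      (pvCands n c1).foldl (fun acc2 c2 =>
        if pvConf state (pvR1 state c1) c1 c2 then acc2 ++ [(c1, c2)] else acc2) acc) []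
    = (List.range n).flatMap (pvGroup state n) := by
  have h : ∀ (acc : List (Nat × Nat)) (c1 : Nat),
      (pvCands n c1).foldl (fun acc2 c2 =>
        if pvConf state (pvR1 state c1) c1 c2 then acc2 ++ [(c1, c2)] else acc2) acc
      = acc ++ pvGroup state n c1 := by
    intro acc c1
    exact PySem.List.foldl_append_if _ _ _ _
  refine Eq.trans ?_ ((PySem.List.foldl_append_eq_flatMap (pvGroup state n) (List.range n) []).trans (List.nil_append _))
  apply PySem.List.foldl_congr_mem
  intro acc c1 _
  exact h acc c1

theorem pv_groupA_skip (u : Nat) (vs : List Nat) (m : PySem.Set Nat) (s : Int) (hu : u ∈ m) :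
    vs.foldl (fun p v => pvStepA p (u, v)) (m, s) = (m, s) := by
  induction vs with
  | nil => rfl
  | cons v t ih =>
    simp only [List.foldl_cons]
    rw [show pvStepA (m, s) (u, v) = (m, s) by simp [pvStepA, hu]]
    exact ih

theorem pv_groupA_eq (u : Nat) (vs : List Nat) (m : PySem.Set Nat) (s : Int) :
    vs.foldl (fun p v => pvStepA p (u, v)) (m, s) =
      if u ∈ m then (m, s)
      else match vs.find? (fun v => !decide (v ∈ m)) with
        | some v => (PySem.Set.add (PySem.Set.add m u) v, s + 1)
        | none => (m, s) := by
  induction vs with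
  | nil => by_cases hu : u ∈ m <;> simp [List.find?, hu]
  | cons v t ih =>
    by_cases hu : u ∈ m
    · simp [hu, pv_groupA_skip u (v :: t) m s hu]
    · by_cases hv : v ∈ m
      · simp only [List.foldl_cons, List.find?, hv, decide_true, Bool.not_true]
        simpa [pvStepA, hv, hu] using ih
      · simp only [List.foldl_cons, List.find?, hv, decide_false, Bool.not_false, hu]
        have hstep : pvStepA (m, s) (u, v) = (PySem.Set.add (PySem.Set.add m u) v, s + 1) := by
          simp [pvStepA, hu, hv]
        rw [hstep]
        have hu' : u ∈ PySem.Set.add (PySem.Set.add m u) v := by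
          simp [PySem.Set.mem_add]
        simp [pv_groupA_skip u t _ _ hu']

theorem pv_find?_filter {α : Type} (l : List α) (q p : α → Bool) :
    (l.filter q).find? p = l.find? (fun x => q x && p x) := by
  induction l with
  | nil => rfl
  | cons x t ih =>
    by_cases hq : q x
    · by_cases hp : p x <;> simp [List.find?, hq, hp, ih]
    · simp [List.find?, hq, ih]

theorem pv_find?_congr_mem {α : Type} (l : List α) (p q : α → Bool) (h : ∀ x ∈ l, p x = q x) :
    l.find? p = l.find? q := by
  induction l with
  | nil => rfl
  | cons x t ih =>
    have hx := h x (by simp)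
    by_cases hp : p x
    · simp [List.find?, hp, hx ▸ hp]
    · have : q x = false := by rw [← hx]; simpa using hp
      simp [List.find?, hp, this]
      exact ih (fun y hy => h y (by simp [hy]))

theorem pv_mem_cands {n c1 v : Nat} (hc1 : c1 < n) (hv : v ∈ pvCands n c1) :
    c1 < v ∧ v < n := by
  simp only [pvCands, List.mem_range'] at hv
  omega

theorem pv_main (state : List Int) (n : Nat) (cs : List Nat) (hcs : ∀ c ∈ cs, c < n)
    (mA : PySem.Set Nat) (mB : List Bool) (s : Int) (h : pvRel n mA mB) :
    pvRel n ((cs.flatMap (pvGroup state n)).foldl pvStepA (mA, s)).1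
            ((cs.foldl (pvStepB state n) (mB, s)).1)
    ∧ ((cs.flatMap (pvGroup state n)).foldl pvStepA (mA, s)).2
      = ((cs.foldl (pvStepB state n) (mB, s)).2) := by
  induction cs generalizing mA mB s with
  | nil => exact ⟨h, rfl⟩
  | cons c1 t ih =>
    have hc1 : c1 < n := hcs c1 (by simp)
    have hrel := h.2 c1 hc1
    simp only [List.flatMap_cons, List.foldl_append, List.foldl_cons]
    have hgrp : (pvGroup state n c1).foldl pvStepA (mA, s)
        = ((pvCands n c1).filter (fun c2 => pvConf state (pvR1 state c1) c1 c2)).foldl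
            (fun p v => pvStepA p (c1, v)) (mA, s) := by
      simp [pvGroup, List.foldl_map]
    rw [hgrp, pv_groupA_eq]
    by_cases hb : mB.getD c1 false = true
    · have hma : c1 ∈ mA := hrel.mpr hb
      have hB : pvStepB state n (mB, s) c1 = (mB, s) := by
        unfold pvStepB; rw [if_pos]; exact hb
      rw [hB]; simp only [hma, if_true]
      exact ih (fun c hc => hcs c (by simp [hc])) mA mB s h
    · have hb0 : mB.getD c1 false = false := by
        cases hgd : mB.getD c1 false
        · rfl
        · exact absurd hgd hb
      have hma : c1 ∉ mA := fun hmem => hb (hrel.mp hmem)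
      have hfind : ((pvCands n c1).filter (fun c2 => pvConf state (pvR1 state c1) c1 c2)).find?
            (fun v => !decide (v ∈ mA))
          = (pvCands n c1).find?
              (fun c2 => !mB.getD c2 false && pvConf state (pvR1 state c1) c1 c2) := by
        rw [pv_find?_filter]
        apply pv_find?_congr_mem
        intro v hv
        have hvn := (pv_mem_cands hc1 hv).2
        have hdg : decide (v ∈ mA) = mB.getD v false := by
          by_cases hvm : v ∈ mA
          · rw [(h.2 v hvn).mp hvm]; simp [hvm]
          · have hf : mB.getD v false = false := by
              cases hgd : mB.getD v false
              · rfl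
              · exact absurd ((h.2 v hvn).mpr hgd) hvm
            rw [hf]; simp [hvm]
        rw [hdg, Bool.and_comm]
      simp only [hma, if_false, hfind]
      cases hf : (pvCands n c1).find?
          (fun c2 => !mB.getD c2 false && pvConf state (pvR1 state c1) c1 c2) with
      | none =>
        have hB : pvStepB state n (mB, s) c1 = (mB, s) := by
          unfold pvStepB
          rw [if_neg (by rw [hb0]; simp)]
          rw [hf]
        rw [hB]
        exact ih (fun c hc => hcs c (by simp [hc])) mA mB s h
      | some v =>
        have hB : pvStepB state n (mB, s) c1 = ((mB.set c1 true).set v true, s + 1) := by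
          unfold pvStepB
          rw [if_neg (by rw [hb0]; simp)]
          rw [hf]
        rw [hB]
        have hvmem : v ∈ pvCands n c1 := List.mem_of_find?_eq_some hf
        have hvn := pv_mem_cands hc1 hvmem
        have hrel' : pvRel n (PySem.Set.add (PySem.Set.add mA c1) v)
            ((mB.set c1 true).set v true) := by
          constructor
          · simp [h.1]
          · intro c hc
            have hlen1 : c1 < mB.length := by rw [h.1]; exact hc1
            have hlenv : v < (mB.set c1 true).length := by simp [h.1]; omega
            have hclen : c < mB.length := by rw [h.1]; exact hc
            have hgd : ((mB.set c1 true).set v true).getD c false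
                = if c = v then true else if c = c1 then true else mB.getD c false := by
              simp only [List.getD_eq_getElem?_getD, List.getElem?_set]
              by_cases h1 : v = c
              · simp [h1, hclen]
              · have h1' : ¬ c = v := fun hh => h1 hh.symm
                by_cases h2 : c1 = c
                · simp [h1, h1', h2, hclen]
                · have h2' : ¬ c = c1 := fun hh => h2 hh.symm
                  simp [h1, h1', h2, h2']
            rw [hgd]
            simp only [PySem.Set.mem_add]
            constructor
            · rintro ((hm | rfl) | rfl)
              · have := (h.2 c hc).mp hm
                split_ifs <;> first | rfl | exact this
              · split_ifs <;> simp_all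
              · simp
            · intro hx
              by_cases h1 : c = v
              · right; exact h1
              · by_cases h2 : c = c1
                · left; right; exact h2
                · left; left
                  rw [if_neg h1, if_neg h2] at hx
                  exact (h.2 c hc).mpr hx
        exact ih (fun c hc => hcs c (by simp [hc])) _ _ (s + 1) hrel'

theorem pv_compute_eq (state : List Int) :
    compute state
      = (((List.range state.length).flatMap (pvGroup state state.length)).foldl
          pvStepA (PySem.Set.empty, 0)).2 := by
  by_cases he : (List.range state.length).flatMap (pvGroup state state.length) = []
  · simp [compute, pv_edgesA, he, PySem.Set.empty]
  · simp [compute, pv_edgesA, List.isEmpty_iff, he]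

-- ===== VERDICT (by name: the statement is the Claim_ definition above) =====
theorem compute_spec : Claim_equal_compute := by
  intro state _
  unfold Spec_compute compute_alt
  rw [pv_compute_eq]
  have h0 : pvRel state.length PySem.Set.empty (List.replicate state.length false) := by
    constructor
    · simp
    · intro c hc
      simp [PySem.Set.empty, List.getD_eq_getElem?_getD, hc]
  exact (pv_main state state.length (List.range state.length)
    (fun c hc => List.mem_range.mp hc) PySem.Set.empty _ 0 h0).2
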